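-- pv_equiv track=rewrite | github.com/wkan84/ProjEuler | pe491.py | tup_count
-- ===== SOURCE A (Python) =====
-- import math
--
-- def tup_count(tup):
--     tup_cnt = {0:0, 1:0, 2:0, 3:0, 4:0, 5:0, 6:0, 7:0, 8:0, 9:0}
--     comp_cnt = {0:2, 1:2, 2:2, 3:2, 4:2, 5:2, 6:2, 7:2, 8:2, 9:2}
--
--     for i in tup:
--         tup_cnt[i] += 1
--         comp_cnt[i] -= 1
--
--     tup_val = math.factorial(9)
--     if tup_cnt[0] == 0:
--         tup_val *= 10
--     elif tup_cnt[0] == 1: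
--         tup_val *= 9
--     else:
--         tup_val *= 8
--     for c in tup_cnt.values():
--         if c == 2:
--             tup_val = tup_val // 2
--
--     comp_val = math.factorial(10)
--     for c in comp_cnt.values():
--         if c == 2:
--             comp_val = comp_val // 2
--     return tup_val * comp_val
-- ===== SOURCE B (Python) =====
-- import math
--
-- def _runs(s):
--     # run-length encode a sorted list: [(value, run length), ...]
--     if not s:
--         return []
--     head = s[0]
--     k = 1
--     while k < len(s) and s[k] == head:
--         k += 1
--     return [(head, k)] + _runs(s[k:])
--
-- def tup_count(tup):
--     runs = _runs(sorted(tup))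
--     pairs = sum(1 for _, r in runs if r == 2)
--     missing = 10 - len(runs)
--     zeros = runs[0][1] if runs and runs[0][0] == 0 else 0
--     mult = 10 if zeros == 0 else 9 if zeros == 1 else 8
--     return (math.factorial(9) * mult // 2 ** pairs) * (math.factorial(10) // 2 ** missing)
-- ===== Notes on version B (the rewrite author's own statement) =====
-- stated objective: alternative
-- what changed: B sorts the tuple and run-length encodes the sorted list by recursion, reading the number of exactly-double digits off the run lengths, the number of missing digits off 10 minus the number of runs, and the zero count off the first run, instead of A's two mutated 10-key dicts and repeated halving loops.
import Mathlib
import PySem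

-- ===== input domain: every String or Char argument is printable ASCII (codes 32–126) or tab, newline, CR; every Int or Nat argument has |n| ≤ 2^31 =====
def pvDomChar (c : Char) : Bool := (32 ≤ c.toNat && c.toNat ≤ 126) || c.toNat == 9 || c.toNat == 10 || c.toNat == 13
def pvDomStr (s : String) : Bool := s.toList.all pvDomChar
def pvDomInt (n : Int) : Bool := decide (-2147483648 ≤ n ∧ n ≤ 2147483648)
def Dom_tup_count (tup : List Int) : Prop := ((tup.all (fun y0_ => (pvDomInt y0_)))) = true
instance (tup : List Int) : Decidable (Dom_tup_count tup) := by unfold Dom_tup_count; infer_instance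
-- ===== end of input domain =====

-- B sorts the tuple and run-length encodes it, reading the pair/missing/zero statistics off
-- the runs instead of mutating A's two 10-key dicts (objective: alternative); return values agree on digit tuples.

-- ===== PORT A =====
def tup_count (tup : List Int) : Int :=
  let tup_cnt0 : PySem.Dict Int Int :=
    PySem.Dict.ofList [(0,0),(1,0),(2,0),(3,0),(4,0),(5,0),(6,0),(7,0),(8,0),(9,0)]
  let comp_cnt0 : PySem.Dict Int Int :=
    PySem.Dict.ofList [(0,2),(1,2),(2,2),(3,2),(4,2),(5,2),(6,2),(7,2),(8,2),(9,2)]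
  -- for i in tup: tup_cnt[i] += 1; comp_cnt[i] -= 1  (keys exist under Pre_; KeyError outside)
  let p := tup.foldl (fun (p : PySem.Dict Int Int × PySem.Dict Int Int) i =>
      (p.1.modify i 0 (fun x => x + 1), p.2.modify i 0 (fun x => x - 1))) (tup_cnt0, comp_cnt0)
  let c0 := p.1.getD 0 0
  let tv1 : Int := if c0 = 0 then 362880 * 10 else if c0 = 1 then 362880 * 9 else 362880 * 8
  let tup_val := p.1.values.foldl (fun v c => if c = 2 then PySem.Int.floordiv v 2 else v) tv1
  let comp_val := p.2.values.foldl (fun v c => if c = 2 then PySem.Int.floordiv v 2 else v) 3628800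
  tup_val * comp_val

-- ===== PORT B =====
-- _runs: run-length encode a sorted list (head, 1 + leading repeats), recurse on the rest
def tupRuns : List Int → List (Int × Int)
  | [] => []
  | h :: t =>
      (h, (1 : Int) + (t.takeWhile (fun x => x == h)).length)
        :: tupRuns (t.dropWhile (fun x => x == h))
termination_by s => s.length
decreasing_by
  simp only [List.length_cons]
  have := List.length_dropWhile_le (fun x => x == h) t
  omega

-- 'missing' as a Nat exponent: under Pre_ there are at most 10 runs, matching Python's 10 - len(runs)
def tup_count_alt (tup : List Int) : Int :=
  let runs := tupRuns (PySem.List.sorted tup (fun x => x) false)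
  let pairs := (runs.filter (fun p => p.2 == 2)).length
  let missing := 10 - runs.length
  let zeros : Int :=
    match runs with
    | [] => 0
    | (v, r) :: _ => if v = 0 then r else 0
  let mult : Int := if zeros = 0 then 10 else if zeros = 1 then 9 else 8
  PySem.Int.floordiv (362880 * mult) (2 ^ pairs) * PySem.Int.floordiv 3628800 (2 ^ missing)

-- ===== PRECONDITION & SPEC =====
-- Pre_ excludes exactly the tuples containing an element outside 0..9: A raises KeyError there.
def Pre_tup_count (tup : List Int) : Prop := ∀ i ∈ tup, 0 ≤ i ∧ i < 10
instance (tup : List Int) : Decidable (Pre_tup_count tup) := by unfold Pre_tup_count; infer_instance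
def pvWitness_tup_count : List Int := [0, 3, 3, 7]

def Spec_tup_count (tup : List Int) (out : Int) : Prop := out = tup_count_alt tup
instance (tup : List Int) (out : Int) : Decidable (Spec_tup_count tup out) := by unfold Spec_tup_count; infer_instance

-- ===== CLAIM =====
def Claim_equal_tup_count : Prop := ∀ (tup : List Int), Dom_tup_count tup → Pre_tup_count tup → Spec_tup_count tup (tup_count tup)

-- ===== LEMMAS AND PROOFS =====

-- counter loop with decrements: getD after the fold is the start value minus the count
theorem getD_foldl_modify_sub_one (l : List Int) (d : PySem.Dict Int Int) (v : Int) :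
    (l.foldl (fun d x => d.modify x 0 (fun x => x - 1)) d).getD v 0 = d.getD v 0 - l.count v := by
  induction l generalizing d with
  | nil => simp
  | cons a l ih =>
    simp only [List.foldl_cons, ih, PySem.Dict.getD_modify, List.count_cons]
    by_cases h : v = a <;> simp [h] <;> omega

-- repeated 'if c == 2: v //= 2' over a list is one floor division by 2^(number of 2s)
theorem foldl_halve_if_two (L : List Int) (v : Int) :
    L.foldl (fun v c => if c = 2 then PySem.Int.floordiv v 2 else v) v
      = PySem.Int.floordiv v (2 ^ L.count 2) := by
  induction L generalizing v with
  | nil => simp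
  | cons a L ih =>
    by_cases h : a = 2
    · simp only [List.foldl_cons, h, if_pos, ih, List.count_cons_self]
      rw [PySem.Int.floordiv_eq_ediv_of_pos (by positivity),
          PySem.Int.floordiv_eq_ediv_of_pos (by positivity),
          PySem.Int.floordiv_eq_ediv_of_pos (by positivity),
          Int.ediv_ediv_of_nonneg (by omega)]
      norm_num [pow_succ]; ring_nf
    · simp only [List.foldl_cons, if_neg h, ih]
      rw [List.count_cons_of_ne h]

theorem set_update_of_subset (s l : List Int) (h : ∀ x ∈ l, x ∈ s) :
    PySem.Set.update s l = s := by
  rw [PySem.Set.update_eq_append_filter]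
  have hnil : ((PySem.Set.ofList l).filter (fun y => !(PySem.Set.contains s y))) = [] := by
    rw [List.filter_eq_nil_iff]
    intro y hy
    have hys : y ∈ s := h y ((PySem.Set.mem_ofList l y).1 hy)
    simp [hys]
  rw [hnil, List.append_nil]

-- the common closed form both programs reach: counts per digit decide everything
def pvDigits : List Int := [0,1,2,3,4,5,6,7,8,9]
def pvCnt (tup : List Int) : List Int := pvDigits.map (fun k => (tup.count k : Int))
def pvCommon (tup : List Int) : Int :=
  (PySem.Int.floordiv
      (362880 * (if tup.count 0 = 0 then 10 else if tup.count 0 = 1 then (9:Int) else 8))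
      (2 ^ (pvCnt tup).count 2)) *
    PySem.Int.floordiv 3628800 (2 ^ (pvCnt tup).count 0)

theorem count_two_sub (L : List Int) : ((L.map (fun x => 2 - x)).count 2) = L.count 0 := by
  induction L with
  | nil => simp
  | cons a L ih =>
    by_cases h : a = 0
    · simp [h, ih]
    · simp only [List.map_cons, List.count_cons, ih]
      have h2 : ¬((2 - a) = 2) := by omega
      simp [h, h2]

theorem A_closed (tup : List Int) (hpre : Pre_tup_count tup) : tup_count tup = pvCommon tup := by
  have hmem : ∀ x ∈ tup, x ∈ pvDigits := by
    intro x hx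
    have := hpre x hx
    have h0 := this.1; have h1 := this.2
    interval_cases x <;> simp [pvDigits]
  have hmk1 : PySem.Dict.ofList [((0:Int),(0:Int)),(1,0),(2,0),(3,0),(4,0),(5,0),(6,0),(7,0),(8,0),(9,0)]
      = PySem.Dict.mk [((0:Int),(0:Int)),(1,0),(2,0),(3,0),(4,0),(5,0),(6,0),(7,0),(8,0),(9,0)] := by decide
  have hbase1 : ∀ v : Int,
      (PySem.Dict.ofList [((0:Int),(0:Int)),(1,0),(2,0),(3,0),(4,0),(5,0),(6,0),(7,0),(8,0),(9,0)]).getD v 0 = 0 := by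
    intro v; rw [hmk1]; simp [PySem.Dict.getD, PySem.Dict.get?_mk_cons]; split_ifs <;> rfl
  have hbase2 : ∀ k ∈ pvDigits,
      (PySem.Dict.ofList [((0:Int),(2:Int)),(1,2),(2,2),(3,2),(4,2),(5,2),(6,2),(7,2),(8,2),(9,2)]).getD k 0 = 2 := by
    decide
  simp only [tup_count]
  rw [PySem.List.foldl_prod_mk (fun (d : PySem.Dict Int Int) (i : Int) => d.modify i 0 (fun x => x + 1))
        (fun (d : PySem.Dict Int Int) (i : Int) => d.modify i 0 (fun x => x - 1))]
  have hcnt1 : ∀ v : Int,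
      (tup.foldl (fun d x => d.modify x 0 (fun x => x + 1))
        (PySem.Dict.ofList [((0:Int),(0:Int)),(1,0),(2,0),(3,0),(4,0),(5,0),(6,0),(7,0),(8,0),(9,0)])).getD v 0
      = (tup.count v : Int) := by
    intro v; rw [PySem.Dict.getD_foldl_modify_add_one, hbase1, zero_add]
  have hcnt2 : ∀ v : Int,
      (tup.foldl (fun d x => d.modify x 0 (fun x => x - 1))
        (PySem.Dict.ofList [((0:Int),(2:Int)),(1,2),(2,2),(3,2),(4,2),(5,2),(6,2),(7,2),(8,2),(9,2)])).getD v 0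
      = (PySem.Dict.ofList [((0:Int),(2:Int)),(1,2),(2,2),(3,2),(4,2),(5,2),(6,2),(7,2),(8,2),(9,2)]).getD v 0
          - (tup.count v : Int) := by
    intro v; rw [getD_foldl_modify_sub_one]
  have hk1 : (tup.foldl (fun d x => d.modify x 0 (fun x => x + 1))
        (PySem.Dict.ofList [((0:Int),(0:Int)),(1,0),(2,0),(3,0),(4,0),(5,0),(6,0),(7,0),(8,0),(9,0)])).keys = pvDigits := by
    rw [PySem.Dict.keys_foldl_modify]
    have hb : (PySem.Dict.ofList [((0:Int),(0:Int)),(1,0),(2,0),(3,0),(4,0),(5,0),(6,0),(7,0),(8,0),(9,0)]).keys = pvDigits := by decide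
    rw [hb]; exact set_update_of_subset _ _ hmem
  have hk2 : (tup.foldl (fun d x => d.modify x 0 (fun x => x - 1))
        (PySem.Dict.ofList [((0:Int),(2:Int)),(1,2),(2,2),(3,2),(4,2),(5,2),(6,2),(7,2),(8,2),(9,2)])).keys = pvDigits := by
    rw [PySem.Dict.keys_foldl_modify]
    have hb : (PySem.Dict.ofList [((0:Int),(2:Int)),(1,2),(2,2),(3,2),(4,2),(5,2),(6,2),(7,2),(8,2),(9,2)]).keys = pvDigits := by decide
    rw [hb]; exact set_update_of_subset _ _ hmem
  have hv1 : (tup.foldl (fun d x => d.modify x 0 (fun x => x + 1))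
        (PySem.Dict.ofList [((0:Int),(0:Int)),(1,0),(2,0),(3,0),(4,0),(5,0),(6,0),(7,0),(8,0),(9,0)])).values
      = pvCnt tup := by
    rw [PySem.Dict.values_eq_map_keys _ (by rw [hk1]; decide) 0, hk1, pvCnt]
    exact List.map_congr_left (fun k _ => hcnt1 k)
  have hv2 : (tup.foldl (fun d x => d.modify x 0 (fun x => x - 1))
        (PySem.Dict.ofList [((0:Int),(2:Int)),(1,2),(2,2),(3,2),(4,2),(5,2),(6,2),(7,2),(8,2),(9,2)])).values
      = (pvCnt tup).map (fun x => 2 - x) := by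
    rw [PySem.Dict.values_eq_map_keys _ (by rw [hk2]; decide) 0, hk2, pvCnt, List.map_map]
    refine List.map_congr_left (fun k hk => ?_)
    simp only [Function.comp]
    rw [hcnt2 k, hbase2 k hk]
  rw [hv1, hv2, hcnt1 0, foldl_halve_if_two, foldl_halve_if_two, count_two_sub]
  simp only [pvCommon]
  rcases h0 : tup.count 0 with _ | _ | n
  · norm_num
  · norm_num
  · have hne0 : ((n + 2 : Nat) : Int) ≠ 0 := by omega
    have hne1 : ((n + 2 : Nat) : Int) ≠ 1 := by omega
    rw [if_neg hne0, if_neg hne1]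
    norm_num

-- ---- B-side lemmas: run-length encoding of a sorted list vs per-digit counts ----


theorem dropWhile_gt (h : Int) (t : List Int)
    (hs : t.Pairwise (· ≤ ·)) (hall : ∀ x ∈ t, h ≤ x) :
    ∀ x ∈ t.dropWhile (fun y => y == h), h < x := by
  induction t with
  | nil => simp
  | cons a t ih =>
    by_cases ha : a = h
    · rw [List.dropWhile_cons_of_pos (by simp [ha])]
      exact ih (hs.tail) (fun x hx => hall x (List.mem_cons_of_mem _ hx))
    · rw [List.dropWhile_cons_of_neg (by simp [ha])]
      intro x hx
      rcases List.mem_cons.1 hx with rfl | hx'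
      · exact lt_of_le_of_ne (hall x (List.mem_cons_self)) (fun e => ha e.symm)
      · have hax : a ≤ x := (List.pairwise_cons.1 hs).1 x hx'
        have : h < a := lt_of_le_of_ne (hall a List.mem_cons_self) (fun e => ha e.symm)
        omega

theorem count_head_runs (h : Int) (t : List Int)
    (hs : t.Pairwise (· ≤ ·)) (hall : ∀ x ∈ t, h ≤ x) :
    (h :: t).count h = 1 + (t.takeWhile (fun y => y == h)).length := by
  have hsplit := List.takeWhile_append_dropWhile (p := fun y => y == h) (l := t)
  have htake : (t.takeWhile (fun y => y == h)).count h = (t.takeWhile (fun y => y == h)).length := by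
    rw [List.count_eq_length]
    intro x hx
    have := List.mem_takeWhile_imp hx
    simpa using (by simpa using this : x = h).symm
  have hdrop : (t.dropWhile (fun y => y == h)).count h = 0 := by
    rw [List.count_eq_zero]
    intro hmem
    exact absurd (dropWhile_gt h t hs hall h hmem) (lt_irrefl h)
  have hc : t.count h = (t.takeWhile (fun y => y == h)).count h + (t.dropWhile (fun y => y == h)).count h := by
    rw [← List.count_append, hsplit]
  simp only [List.count_cons_self]
  omega

theorem count_tail_runs (h v : Int) (t : List Int) (hv : v ≠ h) :
    (h :: t).count v = (t.dropWhile (fun y => y == h)).count v := by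
  have hsplit := List.takeWhile_append_dropWhile (p := fun y => y == h) (l := t)
  have htake : (t.takeWhile (fun y => y == h)).count v = 0 := by
    rw [List.count_eq_zero]
    intro hmem
    have := List.mem_takeWhile_imp hmem
    exact hv (by simpa using this)
  have hc : t.count v = (t.takeWhile (fun y => y == h)).count v + (t.dropWhile (fun y => y == h)).count v := by
    rw [← List.count_append, hsplit]
  rw [List.count_cons, if_neg (by simpa using Ne.symm hv)]
  omega

theorem runs_spec (s : List Int) (hs : s.Pairwise (· ≤ ·)) :
    (∀ p ∈ tupRuns s, p.2 = (s.count p.1 : Int))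
    ∧ ((tupRuns s).map Prod.fst).Nodup
    ∧ (∀ v : Int, v ∈ (tupRuns s).map Prod.fst ↔ v ∈ s) := by
  induction s using tupRuns.induct with
  | case1 => simp [tupRuns]
  | case2 h t ih =>
    have hall : ∀ x ∈ t, h ≤ x := (List.pairwise_cons.1 hs).1
    have htail : t.Pairwise (· ≤ ·) := (List.pairwise_cons.1 hs).2
    have hds : (t.dropWhile (fun y => y == h)).Pairwise (· ≤ ·) :=
      htail.sublist (List.dropWhile_sublist _)
    have hgt := dropWhile_gt h t htail hall
    have hnm : h ∉ t.dropWhile (fun y => y == h) := fun hm => absurd (hgt h hm) (lt_irrefl h)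
    obtain ⟨ih1, ih2, ih3⟩ := ih hds
    have hmemne : ∀ v ∈ t.dropWhile (fun y => y == h), v ≠ h :=
      fun v hv => ne_of_gt (hgt v hv)
    refine ⟨?_, ?_, ?_⟩
    · intro p hp
      simp only [tupRuns, List.mem_cons] at hp
      rcases hp with rfl | hp
      · simp only
        rw [count_head_runs h t htail hall]
        push_cast; ring
      · have hpm : p.1 ∈ (tupRuns (t.dropWhile (fun y => y == h))).map Prod.fst :=
          List.mem_map_of_mem hp
        have hp1 : p.1 ∈ t.dropWhile (fun y => y == h) := (ih3 p.1).1 hpm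
        rw [ih1 p hp, count_tail_runs h p.1 t (hmemne _ hp1)]
    · simp only [tupRuns, List.map_cons, List.nodup_cons]
      exact ⟨fun hm => hnm ((ih3 h).1 hm), ih2⟩
    · intro v
      simp only [tupRuns, List.map_cons, List.mem_cons, ih3]
      constructor
      · rintro (rfl | hv)
        · exact Or.inl rfl
        · have : v ≠ h := hmemne v hv
          have hc := count_tail_runs h v t this
          have : 0 < (h :: t).count v := by
            rw [hc]; exact List.count_pos_iff.2 hv
          exact List.mem_cons.1 (List.count_pos_iff.1 this)
      · intro hv
        by_cases hvh : v = h
        · exact Or.inl hvh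
        · right
          have hc := count_tail_runs h v t hvh
          have : 0 < (t.dropWhile (fun y => y == h)).count v := by
            rw [← hc]; exact List.count_pos_iff.2 (List.mem_cons.2 hv)
          exact List.count_pos_iff.1 this

theorem filter_split_length (l : List Int) (p : Int → Bool) :
    (l.filter p).length + (l.filter (fun x => !(p x))).length = l.length := by
  induction l with
  | nil => simp
  | cons a l ih => by_cases h : p a <;> simp [h] <;> omega

theorem filter_length_eq_digits (F : List Int) (q : Int → Bool) (hF : F.Nodup)
    (hmemq : ∀ v, q v = true → (v ∈ F ↔ v ∈ pvDigits)) :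
    (F.filter q).length = (pvDigits.filter q).length := by
  have hD : pvDigits.Nodup := by decide
  refine (List.perm_of_nodup_nodup_toFinset_eq (hF.filter q) (hD.filter q) ?_).length_eq
  ext x
  simp only [List.toFinset_filter, Finset.mem_filter, List.mem_toFinset]
  constructor
  · rintro ⟨hx, hq⟩; exact ⟨(hmemq x hq).1 hx, hq⟩
  · rintro ⟨hx, hq⟩; exact ⟨(hmemq x hq).2 hx, hq⟩

theorem B_closed (tup : List Int) (hpre : Pre_tup_count tup) :
    tup_count_alt tup = pvCommon tup := by
  have hperm : (PySem.List.sorted tup (fun x => x) false).Perm tup :=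
    PySem.List.sorted_perm tup (fun x => x) false
  have hs : (PySem.List.sorted tup (fun x => x) false).Pairwise (· ≤ ·) :=
    PySem.List.sorted_pairwise (xs := tup) (key := fun x => x)
  set s := PySem.List.sorted tup (fun x => x) false with hsdef
  have hcount : ∀ v : Int, s.count v = tup.count v := fun v => hperm.count_eq v
  have hmems : ∀ v : Int, v ∈ s ↔ v ∈ tup := fun v => hperm.mem_iff
  obtain ⟨h1, h2, h3⟩ := runs_spec s hs
  set R := tupRuns s with hRdef
  have hmemD : ∀ v : Int, v ∈ tup → v ∈ pvDigits := by
    intro v hv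
    have := hpre v hv
    have h0 := this.1; have h1 := this.2
    interval_cases v <;> simp [pvDigits]
  -- the pair exponent
  have hfc : R.filter (fun p => p.2 == 2) = R.filter (fun p => (tup.count p.1 : Int) == 2) := by
    refine List.filter_congr ?_
    intro p hp
    rw [h1 p hp, hcount p.1]
  have hqmem : ∀ v : Int, ((tup.count v : Int) == 2) = true → (v ∈ R.map Prod.fst ↔ v ∈ pvDigits) := by
    intro v hq
    have hc2 : (tup.count v : Int) = 2 := by simpa using hq
    have hvt : v ∈ tup := List.count_pos_iff.1 (by omega)
    simp [h3 v, hmems v, hvt, hmemD v hvt]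
  have hpairs : (R.filter (fun p => p.2 == 2)).length = (pvCnt tup).count 2 := by
    rw [hfc]
    have hmapfilter : ((R.map Prod.fst).filter (fun v => (tup.count v : Int) == 2))
        = (R.filter (fun p => (tup.count p.1 : Int) == 2)).map Prod.fst := by
      rw [List.filter_map]; rfl
    have hlen1 : (R.filter (fun p => (tup.count p.1 : Int) == 2)).length
        = ((R.map Prod.fst).filter (fun v => (tup.count v : Int) == 2)).length := by
      rw [hmapfilter, List.length_map]
    rw [hlen1, filter_length_eq_digits _ _ h2 hqmem]
    rw [pvCnt, List.count, List.countP_map, List.countP_eq_length_filter]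
    rfl
  -- the missing exponent
  have hflen : (R.map Prod.fst).length = (pvDigits.filter (fun v => decide (v ∈ tup))).length := by
    have hself : (R.map Prod.fst).filter (fun v => decide (v ∈ tup)) = R.map Prod.fst := by
      refine List.filter_eq_self.2 ?_
      intro v hv
      simpa using (hmems v).1 ((h3 v).1 hv)
    rw [← hself]
    refine filter_length_eq_digits _ _ h2 ?_
    intro v hq
    have hvt : v ∈ tup := by simpa using hq
    simp [h3 v, hmems v, hvt, hmemD v hvt]
  have hsplit := filter_split_length pvDigits (fun v => decide (v ∈ tup))
  have hnotcong : pvDigits.filter (fun x => !(decide (x ∈ tup)))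
      = pvDigits.filter (fun d => (tup.count d : Int) == 0) := by
    refine List.filter_congr ?_
    intro d _
    by_cases hd : d ∈ tup
    · simp [hd, Nat.pos_iff_ne_zero.1 (List.count_pos_iff.2 hd)]
    · simp [hd, List.count_eq_zero.2 hd]
  have hmiss : (pvCnt tup).count 0 = 10 - R.length := by
    have h10 : pvDigits.length = 10 := by decide
    have hz : (pvCnt tup).count 0 = (pvDigits.filter (fun d => (tup.count d : Int) == 0)).length := by
      rw [pvCnt, List.count, List.countP_map, List.countP_eq_length_filter]
      rfl
    have hRlen : R.length = (pvDigits.filter (fun v => decide (v ∈ tup))).length := by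
      rw [← hflen, List.length_map]
    rw [hz, ← hnotcong, hRlen]
    omega
  -- zeros = tup.count 0
  have hzeros : (match R with
      | [] => (0 : Int)
      | (v, r) :: _ => if v = 0 then r else 0) = (tup.count 0 : Int) := by
    match hR : R with
    | [] =>
      have hse : s = [] := by
        cases hse : s with
        | nil => rfl
        | cons a t => rw [hRdef, hse, tupRuns] at hR; exact absurd hR (by simp)
      have h' := hperm.symm
      rw [hse] at h'
      simp [h'.eq_nil]
    | (v, r) :: rest =>
      have hpR : (v, r) ∈ R := by rw [hR]; exact List.mem_cons_self
      have hvr : r = (s.count v : Int) := h1 (v, r) hpR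
      cases hse : s with
      | nil => rw [hRdef, hse, tupRuns] at hR; exact absurd hR (by simp)
      | cons a t =>
        have heq := hR
        rw [hRdef, hse, tupRuns] at heq
        have hva : v = a := (congrArg Prod.fst (List.cons_eq_cons.1 heq).1).symm
        by_cases hv0 : v = 0
        · simp only [if_pos hv0]
          rw [hvr, hcount, hv0]
        · simp only [if_neg hv0]
          have hmin : ∀ y ∈ s, a ≤ y := by
            intro y hy
            rw [hse] at hy hs
            rcases List.mem_cons.1 hy with rfl | hy'
            · exact le_refl y
            · exact (List.pairwise_cons.1 hs).1 y hy'
          have h0n : (0 : Int) ∉ s := by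
            intro h0s
            have ha0 : a ≤ 0 := hmin 0 h0s
            have haT : a ∈ s := by rw [hse]; exact List.mem_cons_self
            have := (hpre a ((hmems a).1 haT)).1
            have : a = 0 := by omega
            exact hv0 (hva.trans this)
          have : tup.count 0 = 0 := by
            rw [← hcount, List.count_eq_zero]
            simpa using h0n
          simp [this]
  -- assemble
  simp only [tup_count_alt, ← hsdef, ← hRdef, pvCommon]
  rw [hzeros, hpairs, ← hmiss]
  rcases h0 : tup.count 0 with _ | _ | n
  · norm_num
  · norm_num
  · have hne0 : ((n + 2 : Nat) : Int) ≠ 0 := by omega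
    have hne1 : ((n + 2 : Nat) : Int) ≠ 1 := by omega
    rw [if_neg hne0, if_neg hne1]
    norm_num

-- ===== VERDICT =====
theorem tup_count_spec : Claim_equal_tup_count := by
  intro tup _ hpre
  show tup_count tup = tup_count_alt tup
  rw [A_closed tup hpre, B_closed tup hpre]
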